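-- pv_equiv track=rewrite | github.com/honi/uba-aed2 | Prácticas/Soluciones/Práctica5/python/ej6.py | ObtenerEscaleras
-- ===== SOURCE A (Python) =====
-- from typing import List, Tuple
--
-- def ObtenerEscaleras(A: List[int]) -> List[Tuple[int, int]]:
--     B = []
--     n = len(A)
--     i = 0
--     while i < n:
--         j = i
--         while j < n - 1 and A[j + 1] == A[j] + 1:
--             j += 1
--         B.append((i, j))
--         i = j + 1
--     return B
-- ===== SOURCE B (Python) =====
-- from typing import List, Tuple
--
-- def ObtenerEscaleras(A: List[int]) -> List[Tuple[int, int]]: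
--     n = len(A)
--     ends = [k for k in range(n) if k == n - 1 or A[k + 1] != A[k] + 1]
--     starts = [0] + [e + 1 for e in ends[:-1]]
--     return list(zip(starts, ends))
-- ===== Notes on version B (the rewrite author's own statement) =====
-- stated objective: alternative
-- what changed: Replaced A's nested jump-ahead while loop by a two-stage construction: one scan collects all run-end boundary indices (k == n-1 or A[k+1] != A[k]+1), then the starts (0 followed by each previous end + 1) are zipped with the ends.
import Mathlib
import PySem

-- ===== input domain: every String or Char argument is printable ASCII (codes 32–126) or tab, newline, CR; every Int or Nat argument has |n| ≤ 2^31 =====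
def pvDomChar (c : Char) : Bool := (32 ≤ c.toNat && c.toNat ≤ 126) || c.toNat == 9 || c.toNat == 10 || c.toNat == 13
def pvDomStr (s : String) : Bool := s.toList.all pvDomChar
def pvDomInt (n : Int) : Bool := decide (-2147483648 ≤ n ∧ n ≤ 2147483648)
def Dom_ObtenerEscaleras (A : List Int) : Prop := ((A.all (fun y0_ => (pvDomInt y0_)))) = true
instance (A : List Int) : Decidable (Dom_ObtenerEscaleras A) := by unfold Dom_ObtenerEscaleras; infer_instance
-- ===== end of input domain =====

-- B replaces A's nested jump-ahead while loop by a two-stage 'collect run-end boundaries,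
-- then zip starts with ends' construction (objective: alternative decomposition, same cost).

-- ===== PORT A =====
-- inner while loop (fuel = remaining steps, A.length always suffices):
-- advance j while j < n - 1 and A[j+1] == A[j] + 1
def pvInnerA (A : List Int) : Nat → Nat → Nat
  | 0, j => j
  | fuel + 1, j =>
    if j < A.length - 1 ∧ A.getD (j + 1) 0 = A.getD j 0 + 1 then
      pvInnerA A fuel (j + 1)
    else j

-- outer while loop (fuel = remaining iterations): emit (i, j) and restart at j + 1
def pvOuterA (A : List Int) : Nat → Nat → List (Int × Int)
  | 0, _ => []
  | fuel + 1, i =>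
    if i < A.length then
      ((i : Int), (pvInnerA A A.length i : Int)) :: pvOuterA A fuel (pvInnerA A A.length i + 1)
    else []

def ObtenerEscaleras (A : List Int) : List (Int × Int) := pvOuterA A A.length 0

-- ===== PORT B =====
-- run-end boundary test: k == n-1 or A[k+1] != A[k]+1
def pvBoundary (A : List Int) (k : Nat) : Bool :=
  k == A.length - 1 || !(A.getD (k + 1) 0 == A.getD k 0 + 1)

def ObtenerEscaleras_alt (A : List Int) : List (Int × Int) :=
  let ends : List Nat := (List.range A.length).filter (pvBoundary A)
  let starts : List Nat := 0 :: ends.dropLast.map (· + 1)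
  (starts.zip ends).map (fun p => ((p.1 : Int), (p.2 : Int)))

-- ===== PRECONDITION & SPEC =====
def Spec_ObtenerEscaleras (A : List Int) (out : List (Int × Int)) : Prop := out = ObtenerEscaleras_alt A
instance (A : List Int) (out : List (Int × Int)) : Decidable (Spec_ObtenerEscaleras A out) := by unfold Spec_ObtenerEscaleras; infer_instance

-- ===== CLAIM (what is proved, stated in full; the proofs are below) =====
def Claim_equal_ObtenerEscaleras : Prop := ∀ (A : List Int), Dom_ObtenerEscaleras A → Spec_ObtenerEscaleras A (ObtenerEscaleras A)

-- ===== LEMMAS AND PROOFS =====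

-- abstract pair builder: consumes the sorted list of run ends, threading the next start
def pvMkPairs : Nat → List Nat → List (Int × Int)
  | _, [] => []
  | i, e :: es => ((i : Int), (e : Int)) :: pvMkPairs (e + 1) es

theorem pvInnerA_ge (A : List Int) (f j : Nat) : j ≤ pvInnerA A f j := by
  induction f generalizing j with
  | zero => simp [pvInnerA]
  | succ f ih =>
    rw [pvInnerA]
    split
    · exact le_trans (by omega) (ih (j + 1))
    · exact le_refl j

-- with enough fuel, the filtered boundary list starting at j is (pvInnerA A f j) :: rest
theorem filter_range'_inner (A : List Int) (f j : Nat)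
    (hf : A.length ≤ j + f) (h : j < A.length) :
    (List.range' j (A.length - j)).filter (pvBoundary A)
      = pvInnerA A f j ::
        (List.range' (pvInnerA A f j + 1) (A.length - (pvInnerA A f j + 1))).filter (pvBoundary A) := by
  induction f generalizing j with
  | zero => omega
  | succ f ih =>
    have hrange : List.range' j (A.length - j) = j :: List.range' (j + 1) (A.length - (j + 1)) := by
      have : A.length - j = (A.length - (j + 1)) + 1 := by omega
      rw [this, List.range'_succ]
    rw [pvInnerA]
    split
    · rename_i hc
      have hb : pvBoundary A j = false := by
        have e1 : (j == A.length - 1) = false := by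
          simp only [beq_eq_false_iff_ne]; omega
        have e2 : (A.getD (j + 1) 0 == A.getD j 0 + 1) = true := beq_iff_eq.mpr hc.2
        unfold pvBoundary
        rw [e1, e2]
        rfl
      rw [hrange, List.filter_cons, hb]
      simpa using ih (j + 1) (by omega) (by omega)
    · rename_i hc
      have hb : pvBoundary A j = true := by
        unfold pvBoundary
        by_cases h1 : j = A.length - 1
        · rw [beq_iff_eq.mpr h1, Bool.true_or]
        · have h2 : ¬ A.getD (j + 1) 0 = A.getD j 0 + 1 := fun hh => hc ⟨by omega, hh⟩
          rw [beq_eq_false_iff_ne.mpr h2, Bool.not_false, Bool.or_true]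
      rw [hrange, List.filter_cons, hb]
      simp

theorem outer_eq_mkPairs (A : List Int) (f i : Nat) (hf : A.length ≤ i + f) :
    pvOuterA A f i = pvMkPairs i ((List.range' i (A.length - i)).filter (pvBoundary A)) := by
  induction f generalizing i with
  | zero =>
    have : A.length - i = 0 := by omega
    simp [pvOuterA, this, pvMkPairs]
  | succ f ih =>
    rw [pvOuterA]
    split
    · rename_i h
      rw [filter_range'_inner A A.length i (by omega) h, pvMkPairs]
      refine congrArg _ ?_
      have hge := pvInnerA_ge A A.length i
      exact ih (pvInnerA A A.length i + 1) (by omega)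
    · rename_i h
      have : A.length - i = 0 := by omega
      simp [this, pvMkPairs]

theorem mkPairs_eq_zip (es : List Nat) (i : Nat) :
    pvMkPairs i es
      = ((i :: es.dropLast.map (· + 1)).zip es).map (fun p => ((p.1 : Int), (p.2 : Int))) := by
  induction es generalizing i with
  | nil => simp [pvMkPairs]
  | cons e es ih =>
    cases es with
    | nil => simp [pvMkPairs]
    | cons f t =>
      rw [pvMkPairs, ih (e + 1)]
      simp [List.dropLast_cons_of_ne_nil]

-- ===== VERDICT (by name: the statement is the Claim_ definition above) =====
theorem ObtenerEscaleras_spec : Claim_equal_ObtenerEscaleras := by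
  intro A _
  show ObtenerEscaleras A = ObtenerEscaleras_alt A
  rw [ObtenerEscaleras, outer_eq_mkPairs A A.length 0 (by omega), ObtenerEscaleras_alt]
  simp only [Nat.sub_zero, ← List.range_eq_range']
  exact mkPairs_eq_zip _ 0
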